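-- pv_equiv track=rewrite | github.com/UTSAVS26/PyVerse | Algorithms_and_Data_Structures/Visualization/algorithm.py | highlight_array
-- ===== SOURCE A (Python) =====
-- def highlight_array(arr, sorted_indices):
--     highlighted_arr = []
--     for i in range(len(arr)):
--         if i in sorted_indices:
--             highlighted_arr.append(f"<span style='color:green'>{arr[i]}</span>")
--         else:
--             highlighted_arr.append(str(arr[i]))
--     return highlighted_arr
-- ===== SOURCE B (Python) =====
-- def highlight_array(arr, sorted_indices):
--     result = [str(x) for x in arr]
--     for i in sorted_indices:
--         if 0 <= i < len(arr):
--             result[i] = f"<span style='color:green'>{arr[i]}</span>"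
--     return result
-- ===== Notes on version B (the rewrite author's own statement) =====
-- stated objective: simpler
-- what changed: B builds all plain strings in one map pass and then patches only the highlighted positions by iterating sorted_indices, instead of scanning the whole array with an O(len(sorted_indices)) membership test at every position.
import Mathlib
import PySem

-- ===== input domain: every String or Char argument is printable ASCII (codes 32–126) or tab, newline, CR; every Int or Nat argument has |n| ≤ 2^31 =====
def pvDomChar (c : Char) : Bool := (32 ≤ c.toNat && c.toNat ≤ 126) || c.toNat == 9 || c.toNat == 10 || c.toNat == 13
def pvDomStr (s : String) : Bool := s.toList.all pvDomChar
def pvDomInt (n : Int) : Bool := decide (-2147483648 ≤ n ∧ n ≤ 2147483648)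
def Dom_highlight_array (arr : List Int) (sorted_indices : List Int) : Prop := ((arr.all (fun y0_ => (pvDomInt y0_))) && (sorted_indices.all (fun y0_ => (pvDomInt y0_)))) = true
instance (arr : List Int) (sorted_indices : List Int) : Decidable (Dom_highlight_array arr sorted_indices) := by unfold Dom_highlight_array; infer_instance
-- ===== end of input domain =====

-- B builds plain strings in one pass, then patches highlighted positions by iterating sorted_indices (simpler/faster decomposition); proved equal to A everywhere.


-- ===== PORT A =====
-- for i in range(len(arr)): append highlighted/plain depending on membership
def highlight_array (arr : List Int) (sorted_indices : List Int) : List String :=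
  (List.range arr.length).foldl
    (fun highlighted_arr (i : Nat) =>
      if (i : Int) ∈ sorted_indices then
        highlighted_arr ++ ["<span style='color:green'>" ++ PySem.Int.toStr (arr.getD i 0) ++ "</span>"]
      else
        highlighted_arr ++ [PySem.Int.toStr (arr.getD i 0)])
    []

-- ===== PORT B =====
-- result = [str(x) for x in arr]; then patch positions listed in sorted_indices (guarded 0 <= i < len(arr))
def highlight_array_alt (arr : List Int) (sorted_indices : List Int) : List String :=
  sorted_indices.foldl
    (fun result i =>
      if 0 ≤ i ∧ i < (arr.length : Int) then
        result.set i.toNat ("<span style='color:green'>" ++ PySem.Int.toStr (arr.getD i.toNat 0) ++ "</span>")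
      else
        result)
    (arr.map (fun x => PySem.Int.toStr x))

-- ===== PRECONDITION & SPEC =====
def Spec_highlight_array (arr : List Int) (sorted_indices : List Int) (out : List String) : Prop := out = highlight_array_alt arr sorted_indices
instance (arr : List Int) (sorted_indices : List Int) (out : List String) : Decidable (Spec_highlight_array arr sorted_indices out) := by unfold Spec_highlight_array; infer_instance

-- ===== CLAIM (what is proved, stated in full; the proofs are below) =====
def Claim_equal_highlight_array : Prop := ∀ (arr : List Int) (sorted_indices : List Int), Dom_highlight_array arr sorted_indices → Spec_highlight_array arr sorted_indices (highlight_array arr sorted_indices)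

-- ===== LEMMAS AND PROOFS =====

-- the per-index values of the result
def pvPlain (arr : List Int) (j : Nat) : String := PySem.Int.toStr (arr.getD j 0)
def pvHi (arr : List Int) (j : Nat) : String :=
  "<span style='color:green'>" ++ PySem.Int.toStr (arr.getD j 0) ++ "</span>"

-- A's append-loop is a map over range
theorem pv_foldl_snoc (l : List Nat) (init : List String) (f : Nat → String) :
    l.foldl (fun acc i => acc ++ [f i]) init = init ++ l.map f := by
  induction l generalizing init with
  | nil => simp
  | cons i tl ih => simp [List.foldl, ih]

theorem pv_A_eq_map (arr sorted_indices : List Int) :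
    highlight_array arr sorted_indices =
      (List.range arr.length).map
        (fun (i : Nat) => if (i : Int) ∈ sorted_indices then pvHi arr i else pvPlain arr i) := by
  unfold highlight_array
  have h := pv_foldl_snoc (List.range arr.length) []
      (fun (i : Nat) => if (i : Int) ∈ sorted_indices then pvHi arr i else pvPlain arr i)
  simp only [List.nil_append] at h
  rw [← h]
  congr 1
  funext acc i
  by_cases hm : (i : Int) ∈ sorted_indices <;> simp [hm, pvHi, pvPlain]

theorem pv_B_length (arr : List Int) (si : List Int) (init : List String) :
    (si.foldl (fun result i =>
        if 0 ≤ i ∧ i < (arr.length : Int) then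
          result.set i.toNat ("<span style='color:green'>" ++ PySem.Int.toStr (arr.getD i.toNat 0) ++ "</span>")
        else result) init).length = init.length := by
  induction si generalizing init with
  | nil => rfl
  | cons i tl ih =>
    simp only [List.foldl]
    split
    · rw [ih]; simp
    · exact ih _

theorem pv_B_get (arr : List Int) (si : List Int) (init : List String) (j : Nat)
    (hlen : init.length = arr.length) (hj : j < arr.length) :
    (si.foldl (fun result i =>
        if 0 ≤ i ∧ i < (arr.length : Int) then
          result.set i.toNat ("<span style='color:green'>" ++ PySem.Int.toStr (arr.getD i.toNat 0) ++ "</span>")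
        else result) init)[j]? =
      if (j : Int) ∈ si then some (pvHi arr j) else init[j]? := by
  induction si generalizing init with
  | nil => simp
  | cons i tl ih =>
    simp only [List.foldl]
    by_cases hg : 0 ≤ i ∧ i < (arr.length : Int)
    · rw [if_pos hg]
      rw [ih (init.set i.toNat ("<span style='color:green'>" ++ PySem.Int.toStr (arr.getD i.toNat 0) ++ "</span>")) (by simp [hlen])]
      by_cases hij : (j : Int) = i
      · have hnat : i.toNat = j := by omega
        have hmem : (j : Int) ∈ i :: tl := by simp [hij]
        rw [if_pos hmem]
        by_cases hmt : (j : Int) ∈ tl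
        · rw [if_pos hmt]
        · rw [if_neg hmt, List.getElem?_set]
          simp [hnat, hlen, hj, pvHi]
      · have hnat : i.toNat ≠ j := by omega
        rw [List.getElem?_set]
        simp [hnat, List.mem_cons, hij]
    · rw [if_neg hg]
      rw [ih _ hlen]
      have hij : (j : Int) ≠ i := by omega
      simp [List.mem_cons, hij]

-- ===== VERDICT (by name: the statement is the Claim_ definition above) =====
theorem highlight_array_spec : Claim_equal_highlight_array := by
  intro arr sorted_indices _
  unfold Spec_highlight_array
  apply List.ext_getElem?
  intro j
  rw [pv_A_eq_map]
  unfold highlight_array_alt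
  by_cases hj : j < arr.length
  · rw [pv_B_get arr sorted_indices _ j (by simp) hj]
    by_cases hm : (j : Int) ∈ sorted_indices
    · simp [hm, hj]
    · simp [hm, hj, pvPlain]
  · refine (List.getElem?_eq_none ?_).trans (List.getElem?_eq_none ?_).symm
    · simpa using Nat.le_of_not_lt hj
    · rw [pv_B_length]
      simpa using Nat.le_of_not_lt hj
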